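-- pv_equiv track=rewrite | github.com/TaiAgbaje/Urban-Planning | common_functions.py | score_solution
-- ===== SOURCE A (Python) =====
-- def score_solution(orig_board, sol_board):
--     score = 0
--     x = 0
--     y = 0
--     r_coord = find_all_coordinates('R', sol_board)
--     c_coord = find_all_coordinates('C', sol_board)
--     i_coord = find_all_coordinates('I', sol_board)
--     for row in sol_board:
--         for plot in row:
--             if plot == 'X':
--                 # Industrial zones within 2 tiles take a penalty of -10
--                 for coord in i_coord:
--                     dist = abs(abs(coord[0] - y) + abs(coord[1] - x))
--                     if dist <=2:
--                         score -= 10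
--                 # Commercial and residential zones within 2 tiles take a penalty of -20
--                 for coord in r_coord:
--                     dist = abs(abs(coord[0] - y) + abs(coord[1] - x))
--                     if dist <=2:
--                         score -= 20
--                 for coord in c_coord:
--                     dist = abs(abs(coord[0] - y) + abs(coord[1] - x))
--                     if dist <=2:
--                         score -= 20
--             elif plot == 'S':
--                 # Residential zones within 2 tiles gain a bonus of 10 points
--                 for coord in r_coord:
--                     dist = abs(abs(coord[0] - y) + abs(coord[1] - x))
--                     if dist <=2:
--                         score += 10
--             elif plot == 'I':
--                 # For each industrial tile within 2 squares, there is a bonus of 2 points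
--                 for coord in i_coord:
--                     dist = abs(abs(coord[0] - y) + abs(coord[1] - x))
--                     if dist <=2:
--                         score += 2
--                 score -= 2 + orig_board[y][x]
--             elif plot == 'R':
--                 # For each industrial site within 3 squares there is a penalty of 5 points
--                 for coord in i_coord:
--                     dist = abs(abs(coord[0] - y) + abs(coord[1] - x))
--                     if dist <=3:
--                         score -= 5
--                 # However, for each commercial site with 3 squares there is a bonus of 4 points
--                 for coord in c_coord:
--                     dist = abs(abs(coord[0] - y) + abs(coord[1] - x))
--                     if dist <=3:
--                         score += 4
--                 score -= 2 + orig_board[y][x]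
--             elif plot == 'C':
--                 # For each residential tile within 3 squares, there is a bonus of 4 points
--                 for coord in r_coord:
--                     dist = abs(abs(coord[0] - y) + abs(coord[1] - x))
--                     if dist <=3:
--                         score += 4
--                 # For each commercial site with 2 squares, there is a penalty of 4 points
--                 for coord in c_coord:
--                     dist = abs(abs(coord[0] - y) + abs(coord[1] - x))
--                     if dist <=2:
--                         score -= 4
--                 score -= 2 + orig_board[y][x]
--             x += 1
--         x = 0
--         y += 1
--     return score
--
-- def find_all_coordinates(building, board):
--     coordinates = []
--     y = 0
--     x = 0
--     for row in board:
--         for plot in row: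
--             if plot == building:
--                 coordinates.append((y, x))
--             x += 1
--         x = 0
--         y += 1
--     return coordinates
-- ===== SOURCE B (Python) =====
-- def count_near(sol_board, y, x, d, t):
--     """Count tiles equal to t within Manhattan distance d of (y, x)."""
--     n = 0
--     for dy in range(-d, d + 1):
--         yy = y + dy
--         if 0 <= yy < len(sol_board):
--             row = sol_board[yy]
--             r = d - abs(dy)
--             for dx in range(-r, r + 1):
--                 xx = x + dx
--                 if 0 <= xx < len(row) and row[xx] == t:
--                     n += 1
--     return n
--
--
-- def score_solution(orig_board, sol_board):
--     score = 0
--     for y, row in enumerate(sol_board):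
--         for x, plot in enumerate(row):
--             if plot == 'X':
--                 score -= 10 * count_near(sol_board, y, x, 2, 'I')
--                 score -= 20 * count_near(sol_board, y, x, 2, 'R')
--                 score -= 20 * count_near(sol_board, y, x, 2, 'C')
--             elif plot == 'S':
--                 score += 10 * count_near(sol_board, y, x, 2, 'R')
--             elif plot == 'I':
--                 score += 2 * count_near(sol_board, y, x, 2, 'I')
--                 score -= 2 + orig_board[y][x]
--             elif plot == 'R':
--                 score -= 5 * count_near(sol_board, y, x, 3, 'I')
--                 score += 4 * count_near(sol_board, y, x, 3, 'C')
--                 score -= 2 + orig_board[y][x]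
--             elif plot == 'C':
--                 score += 4 * count_near(sol_board, y, x, 3, 'R')
--                 score -= 4 * count_near(sol_board, y, x, 2, 'C')
--                 score -= 2 + orig_board[y][x]
--     return score
-- ===== Notes on version B (the rewrite author's own statement) =====
-- stated objective: faster
-- what changed: B drops the precomputed lists of all R/C/I coordinates and their per-tile full scans, and instead counts matching tiles by scanning each tile's fixed Manhattan-radius (<=3) neighborhood directly, making the work per tile constant.
import Mathlib
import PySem

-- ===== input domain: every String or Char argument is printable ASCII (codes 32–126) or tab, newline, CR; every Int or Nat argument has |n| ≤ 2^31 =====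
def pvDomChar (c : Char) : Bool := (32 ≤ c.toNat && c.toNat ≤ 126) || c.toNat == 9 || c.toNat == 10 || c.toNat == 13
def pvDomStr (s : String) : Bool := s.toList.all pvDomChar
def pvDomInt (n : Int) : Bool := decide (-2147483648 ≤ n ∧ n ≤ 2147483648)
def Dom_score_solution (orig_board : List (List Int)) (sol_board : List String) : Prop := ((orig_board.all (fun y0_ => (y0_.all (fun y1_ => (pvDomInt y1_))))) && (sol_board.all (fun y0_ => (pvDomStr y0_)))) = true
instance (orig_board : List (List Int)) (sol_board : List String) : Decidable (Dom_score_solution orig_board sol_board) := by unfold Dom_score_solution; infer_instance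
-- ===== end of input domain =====

-- B replaces A's per-tile scan over ALL building coordinates by a direct scan of the tile's
-- fixed Manhattan-radius (≤3) neighborhood: O(cells) instead of O(cells × buildings).

-- ===== PORT A =====
-- dist = abs(abs(coord[0] - y) + abs(coord[1] - x))
def pvDistA (cd : Int × Int) (y x : Int) : Int := |(|cd.1 - y| + |cd.2 - x|)|

def find_all_coordinates (building : Char) (board : List String) : List (Int × Int) :=
  (board.foldl (fun (st : List (Int × Int) × Int × Int) row =>
      let st2 := row.toList.foldl
        (fun (st : List (Int × Int) × Int × Int) plot =>
          ((if plot = building then st.1 ++ [(st.2.1, st.2.2)] else st.1), st.2.1, st.2.2 + 1)) st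
      (st2.1, st2.2.1 + 1, 0))
    ([], 0, 0)).1

-- the body of A's double loop for one plot (score, y, x are the Python variables);
-- orig_board[y][x] is pyGetD (in range under Pre_score_solution)
def scoreStepA (orig_board : List (List Int)) (rc cc ic : List (Int × Int))
    (score y x : Int) (plot : Char) : Int :=
  if plot = 'X' then
    let s1 := ic.foldl (fun s cd => if pvDistA cd y x ≤ 2 then s - 10 else s) score
    let s2 := rc.foldl (fun s cd => if pvDistA cd y x ≤ 2 then s - 20 else s) s1
    cc.foldl (fun s cd => if pvDistA cd y x ≤ 2 then s - 20 else s) s2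
  else if plot = 'S' then
    rc.foldl (fun s cd => if pvDistA cd y x ≤ 2 then s + 10 else s) score
  else if plot = 'I' then
    (ic.foldl (fun s cd => if pvDistA cd y x ≤ 2 then s + 2 else s) score)
      - (2 + PySem.List.pyGetD (PySem.List.pyGetD orig_board y []) x 0)
  else if plot = 'R' then
    let s1 := ic.foldl (fun s cd => if pvDistA cd y x ≤ 3 then s - 5 else s) score
    (cc.foldl (fun s cd => if pvDistA cd y x ≤ 3 then s + 4 else s) s1)
      - (2 + PySem.List.pyGetD (PySem.List.pyGetD orig_board y []) x 0)
  else if plot = 'C' then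
    let s1 := rc.foldl (fun s cd => if pvDistA cd y x ≤ 3 then s + 4 else s) score
    (cc.foldl (fun s cd => if pvDistA cd y x ≤ 2 then s - 4 else s) s1)
      - (2 + PySem.List.pyGetD (PySem.List.pyGetD orig_board y []) x 0)
  else score

def score_solution (orig_board : List (List Int)) (sol_board : List String) : Int :=
  let rc := find_all_coordinates 'R' sol_board
  let cc := find_all_coordinates 'C' sol_board
  let ic := find_all_coordinates 'I' sol_board
  (sol_board.foldl (fun (st : Int × Int × Int) row =>
      let st2 := row.toList.foldl
        (fun (st : Int × Int × Int) plot =>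
          (scoreStepA orig_board rc cc ic st.1 st.2.1 st.2.2 plot, st.2.1, st.2.2 + 1)) st
      (st2.1, st2.2.1 + 1, 0))
    (0, 0, 0)).1

-- ===== PORT B =====
-- count tiles equal to t within Manhattan distance d of (y, x), scanning the diamond
def count_near (sol_board : List String) (y x d : Int) (t : Char) : Int :=
  (PySem.List.pyRange (-d) (d + 1) 1).foldl (fun n dy =>
    let yy := y + dy
    if 0 ≤ yy ∧ yy < (sol_board.length : Int) then
      let row := (PySem.List.pyGetD sol_board yy "").toList
      let r := d - |dy|
      (PySem.List.pyRange (-r) (r + 1) 1).foldl (fun n dx =>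
        let xx := x + dx
        if 0 ≤ xx ∧ xx < (row.length : Int) ∧ PySem.List.pyGetD row xx ' ' = t then n + 1 else n) n
    else n) 0

def scoreStepB (orig_board : List (List Int)) (sol_board : List String)
    (score y x : Int) (plot : Char) : Int :=
  if plot = 'X' then
    score - 10 * count_near sol_board y x 2 'I'
          - 20 * count_near sol_board y x 2 'R'
          - 20 * count_near sol_board y x 2 'C'
  else if plot = 'S' then
    score + 10 * count_near sol_board y x 2 'R'
  else if plot = 'I' then
    score + 2 * count_near sol_board y x 2 'I'
          - (2 + PySem.List.pyGetD (PySem.List.pyGetD orig_board y []) x 0)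
  else if plot = 'R' then
    score - 5 * count_near sol_board y x 3 'I'
          + 4 * count_near sol_board y x 3 'C'
          - (2 + PySem.List.pyGetD (PySem.List.pyGetD orig_board y []) x 0)
  else if plot = 'C' then
    score + 4 * count_near sol_board y x 3 'R'
          - 4 * count_near sol_board y x 2 'C'
          - (2 + PySem.List.pyGetD (PySem.List.pyGetD orig_board y []) x 0)
  else score

def score_solution_alt (orig_board : List (List Int)) (sol_board : List String) : Int :=
  (PySem.List.enumerate sol_board 0).foldl (fun score yr =>
    (PySem.List.enumerate yr.2.toList 0).foldl (fun score xp =>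
      scoreStepB orig_board sol_board score yr.1 xp.1 xp.2) score) 0

-- ===== PRECONDITION & SPEC =====
-- Pre_ excludes exactly the inputs where Python A raises IndexError: an 'I'/'R'/'C' tile of
-- sol_board whose (row, column) position does not exist in orig_board (B raises there too).
def Pre_score_solution (orig_board : List (List Int)) (sol_board : List String) : Prop :=
  ∀ p ∈ PySem.List.enumerate sol_board 0, ∀ q ∈ PySem.List.enumerate p.2.toList 0,
    (q.2 = 'I' ∨ q.2 = 'R' ∨ q.2 = 'C') →
      PySem.Raise.InRange orig_board.length p.1 ∧
      PySem.Raise.InRange (PySem.List.pyGetD orig_board p.1 []).length q.1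
instance (orig_board : List (List Int)) (sol_board : List String) : Decidable (Pre_score_solution orig_board sol_board) := by
  unfold Pre_score_solution; infer_instance

def pvWitness_score_solution : List (List Int) × List String := ([[3, 1], [0, 2]], ["RX", ".C"])

def Spec_score_solution (orig_board : List (List Int)) (sol_board : List String) (out : Int) : Prop := out = score_solution_alt orig_board sol_board
instance (orig_board : List (List Int)) (sol_board : List String) (out : Int) : Decidable (Spec_score_solution orig_board sol_board out) := by unfold Spec_score_solution; infer_instance

-- ===== CLAIM (what is proved, stated in full; the proofs are below) =====
def Claim_equal_score_solution : Prop := ∀ (orig_board : List (List Int)) (sol_board : List String), Dom_score_solution orig_board sol_board → Pre_score_solution orig_board sol_board → Spec_score_solution orig_board sol_board (score_solution orig_board sol_board)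

-- ===== LEMMAS AND PROOFS =====
def facsRow (t : Char) (y : Int) : List Char → Int → List (Int × Int)
  | [], _ => []
  | c :: cs, x => (if c = t then [(y, x)] else []) ++ facsRow t y cs (x + 1)
def facsRows (t : Char) : List String → Int → List (Int × Int)
  | [], _ => []
  | row :: rest, y => facsRow t y row.toList 0 ++ facsRows t rest (y + 1)

theorem facsRow_countP (t : Char) (y x D yy : Int) : ∀ (cs : List Char) (x0 : Int),
    (((facsRow t yy cs x0).countP fun cd => decide (pvDistA cd y x ≤ D)) : Int)
      = ∑ k ∈ Finset.range cs.length,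
          (if cs.getD k ' ' = t ∧ pvDistA (yy, x0 + (k : Int)) y x ≤ D then 1 else 0) := by
  intro cs
  induction cs with
  | nil => intro x0; simp [facsRow]
  | cons c cs ih =>
      intro x0
      rw [List.length_cons, Finset.sum_range_succ'
        (fun k => (if (c :: cs).getD k ' ' = t ∧ pvDistA (yy, x0 + (k : Int)) y x ≤ D then (1:Int) else 0)) cs.length]
      have hshift : ∑ k ∈ Finset.range cs.length,
          (if (c :: cs).getD (k+1) ' ' = t ∧ pvDistA (yy, x0 + ((k+1 : Nat) : Int)) y x ≤ D then (1:Int) else 0)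
          = ∑ k ∈ Finset.range cs.length,
            (if cs.getD k ' ' = t ∧ pvDistA (yy, (x0 + 1) + (k : Int)) y x ≤ D then (1:Int) else 0) := by
        apply Finset.sum_congr rfl
        intro k _
        have e : x0 + (((k+1 : Nat)) : Int) = (x0 + 1) + (k : Int) := by push_cast; ring
        rw [List.getD_cons_succ, e]
      rw [hshift, ← ih (x0 + 1), show facsRow t yy (c :: cs) x0
          = (if c = t then [(yy, x0)] else []) ++ facsRow t yy cs (x0 + 1) from rfl,
        List.countP_append]
      push_cast
      rw [List.getD_cons_zero, show x0 + (0:Int) = x0 by ring]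
      by_cases h : c = t
      · by_cases h2 : pvDistA (yy, x0) y x ≤ D
        · simp [h, h2]; ring
        · simp [h, h2]
      · simp [h]

theorem facsRows_countP (t : Char) (y x D : Int) : ∀ (rows : List String) (y0 : Int),
    (((facsRows t rows y0).countP fun cd => decide (pvDistA cd y x ≤ D)) : Int)
      = ∑ i ∈ Finset.range rows.length,
          ∑ k ∈ Finset.range (rows.getD i "").toList.length,
            (if (rows.getD i "").toList.getD k ' ' = t ∧ pvDistA (y0 + (i : Int), (k : Int)) y x ≤ D then 1 else 0) := by
  intro rows
  induction rows with
  | nil => intro y0; simp [facsRows]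
  | cons row rest ih =>
      intro y0
      rw [List.length_cons, Finset.sum_range_succ'
        (fun i => ∑ k ∈ Finset.range ((row :: rest).getD i "").toList.length,
          (if ((row :: rest).getD i "").toList.getD k ' ' = t ∧ pvDistA (y0 + (i : Int), (k : Int)) y x ≤ D then (1:Int) else 0)) rest.length]
      have hshift : ∑ i ∈ Finset.range rest.length,
          (∑ k ∈ Finset.range ((row :: rest).getD (i+1) "").toList.length,
            (if ((row :: rest).getD (i+1) "").toList.getD k ' ' = t ∧ pvDistA (y0 + ((i+1 : Nat) : Int), (k : Int)) y x ≤ D then (1:Int) else 0))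
          = ∑ i ∈ Finset.range rest.length,
            ∑ k ∈ Finset.range (rest.getD i "").toList.length,
              (if (rest.getD i "").toList.getD k ' ' = t ∧ pvDistA ((y0 + 1) + (i : Int), (k : Int)) y x ≤ D then (1:Int) else 0) := by
        apply Finset.sum_congr rfl
        intro i _
        have e : y0 + (((i+1 : Nat)) : Int) = (y0 + 1) + (i : Int) := by push_cast; ring
        rw [List.getD_cons_succ, e]
      rw [hshift, ← ih (y0 + 1), show facsRows t (row :: rest) y0
          = facsRow t y0 row.toList 0 ++ facsRows t rest (y0 + 1) from rfl,
        List.countP_append]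
      push_cast
      rw [List.getD_cons_zero, facsRow_countP]
      simp only [zero_add, add_zero]
      ring

def chAt (cs : List Char) (k : Int) : Char := cs.getD k.toNat ' '
def rowAt (sol : List String) (yy : Int) : List Char := (sol.getD yy.toNat "").toList
noncomputable def pvT (sol : List String) (y x D : Int) (t : Char) : Int :=
  ∑ yy ∈ Finset.Ico (0 : Int) (sol.length : Int),
    ∑ k ∈ Finset.Ico (0 : Int) ((rowAt sol yy).length : Int),
      if chAt (rowAt sol yy) k = t ∧ pvDistA (yy, k) y x ≤ D then 1 else 0

theorem pvDistA_eq (a b y x : Int) : pvDistA (a, b) y x = |a - y| + |b - x| := by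
  unfold pvDistA; exact abs_of_nonneg (by positivity)

theorem sum_range_int (n : Nat) (f : Int → Int) :
    ∑ k ∈ Finset.range n, f (k : Int) = ∑ k ∈ Finset.Ico (0 : Int) (n : Int), f k := by
  induction n with
  | zero => simp
  | succ m ih =>
      rw [Finset.sum_range_succ, ih, Nat.cast_succ,
        ← Finset.sum_Ico_add_eq_sum_Ico_add_one (by positivity : (0:Int) ≤ (m:Int)) f]

theorem A_total (sol : List String) (y x D : Int) (t : Char) :
    (((facsRows t sol 0).countP fun cd => decide (pvDistA cd y x ≤ D)) : Int)
      = pvT sol y x D t := by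
  rw [facsRows_countP]
  simp only [zero_add]
  unfold pvT
  rw [← sum_range_int sol.length (fun yy =>
    ∑ k ∈ Finset.Ico (0 : Int) ((rowAt sol yy).length : Int),
      if chAt (rowAt sol yy) k = t ∧ pvDistA (yy, k) y x ≤ D then 1 else 0)]
  apply Finset.sum_congr rfl
  intro i _
  rw [← sum_range_int (rowAt sol (i:Int)).length (fun k =>
    if chAt (rowAt sol (i:Int)) k = t ∧ pvDistA ((i:Int), k) y x ≤ D then 1 else 0)]
  simp [chAt, rowAt]

theorem foldl_if_add_k {α : Type} (p : α → Prop) [DecidablePred p] (k : Int) :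
    ∀ (l : List α) (a : Int),
      l.foldl (fun s cd => if p cd then s + k else s) a
        = a + k * ((l.countP fun cd => decide (p cd)) : Int) := by
  intro l
  induction l with
  | nil => simp
  | cons c cs ih =>
      intro a
      by_cases h : p c <;>
        simp only [List.foldl_cons, List.countP_cons, h, if_pos, if_neg, decide_true,
          decide_false, ih, not_false_iff] <;> push_cast <;> ring

theorem countP_eq_sum_map {α : Type} (p : α → Prop) [DecidablePred p] (l : List α) :
    ((l.countP fun cd => decide (p cd)) : Int) = (l.map (fun cd => if p cd then (1:Int) else 0)).sum := by
  induction l with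
  | nil => simp
  | cons c cs ih =>
      by_cases h : p c
      · simp [h, ih]; ring
      · simp [h, ih]

theorem sum_map_range (n : Nat) (h : Nat → Int) :
    ((List.range n).map h).sum = ∑ i ∈ Finset.range n, h i := by
  induction n with
  | zero => simp
  | succ m ih => rw [List.range_succ, Finset.sum_range_succ, List.map_append, List.sum_append, ih]; simp
theorem sum_Ico_shift (g : Int → Int) (a b c : Int) :
    ∑ k ∈ Finset.Ico a b, g (c + k) = ∑ k ∈ Finset.Ico (a + c) (b + c), g k := by
  have : Finset.Ico (a + c) (b + c) = Finset.map (addLeftEmbedding c) (Finset.Ico a b) := by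
    rw [Finset.map_add_left_Ico]; congr 1 <;> ring
  rw [this, Finset.sum_map]; rfl
theorem sum_pyRange (g : Int → Int) (a b : Int) :
    ((PySem.List.pyRange a b 1).map g).sum = ∑ k ∈ Finset.Ico a b, g k := by
  rw [PySem.List.pyRange_one, List.map_map, sum_map_range _ (g ∘ fun k => a + (k:Int))]
  have h1 : ∑ i ∈ Finset.range (b-a).toNat, (g ∘ fun k : Nat => a + (k:Int)) i
      = ∑ i ∈ Finset.range (b-a).toNat, (fun k : Int => g (a + k)) (i : Int) := rfl
  rw [h1, sum_range_int _ (fun k => g (a + k)), sum_Ico_shift g 0 _ a]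
  rcases le_or_gt a b with h | h
  · rw [show (0:Int)+a = a by ring, show (((b-a).toNat:Int)+a) = b by omega]
  · rw [Finset.Ico_eq_empty (by omega), Finset.Ico_eq_empty (by omega)]
theorem sum_shift_window (f : Int → Int) (c r R : Int)
    (hf : ∀ k, r < |k - c| → f k = 0) :
    ∑ k ∈ Finset.Ico (0 : Int) R, f k
      = ∑ k ∈ Finset.Ico (-r) (r + 1), (if 0 ≤ c + k ∧ c + k < R then f (c + k) else 0) := by
  have hg : ∑ k ∈ Finset.Ico (-r) (r + 1), (if 0 ≤ c + k ∧ c + k < R then f (c + k) else 0)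
      = ∑ k ∈ Finset.Ico (c - r) (c + r + 1), (if 0 ≤ k ∧ k < R then f k else 0) := by
    rw [sum_Ico_shift (fun z => if 0 ≤ z ∧ z < R then f z else 0) (-r) (r+1) c,
      show -r + c = c - r by ring, show r + 1 + c = c + r + 1 by ring]
  rw [hg]
  set B := Finset.Ico (min 0 (c - r)) (max R (c + r + 1)) with hB
  have h1 : ∑ k ∈ Finset.Ico (0 : Int) R, f k
      = ∑ k ∈ Finset.Ico (0 : Int) R, (if 0 ≤ k ∧ k < R then f k else 0) := by
    apply Finset.sum_congr rfl
    intro k hk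
    rw [Finset.mem_Ico] at hk
    rw [if_pos hk]
  have h2 : ∑ k ∈ Finset.Ico (0 : Int) R, (if 0 ≤ k ∧ k < R then f k else 0)
      = ∑ k ∈ B, (if 0 ≤ k ∧ k < R then f k else 0) := by
    apply Finset.sum_subset
    · intro k hk; rw [Finset.mem_Ico] at *; omega
    · intro k _ hk; rw [Finset.mem_Ico] at hk; rw [if_neg (by omega)]
  have h3 : ∑ k ∈ Finset.Ico (c - r) (c + r + 1), (if 0 ≤ k ∧ k < R then f k else 0)
      = ∑ k ∈ B, (if 0 ≤ k ∧ k < R then f k else 0) := by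
    apply Finset.sum_subset
    · intro k hk; rw [Finset.mem_Ico] at *; omega
    · intro k _ hk
      rw [Finset.mem_Ico] at hk
      have habs : r < |k - c| := by rcases abs_cases (k - c) with ⟨h, _⟩ | ⟨h, _⟩ <;> omega
      rw [hf k habs]; split_ifs <;> rfl
  rw [h1, h2, ← h3]

theorem count_near_eq (sol : List String) (y x D : Int) (t : Char) :
    count_near sol y x D t = pvT sol y x D t := by
  unfold count_near
  have hstep : (fun (n dy : Int) =>
      let yy := y + dy
      if 0 ≤ yy ∧ yy < (sol.length : Int) then
        let row := (PySem.List.pyGetD sol yy "").toList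
        let r := D - |dy|
        (PySem.List.pyRange (-r) (r + 1) 1).foldl (fun n dx =>
          let xx := x + dx
          if 0 ≤ xx ∧ xx < (row.length : Int) ∧ PySem.List.pyGetD row xx ' ' = t then n + 1 else n) n
      else n)
      = fun (n dy : Int) => n +
        (if 0 ≤ y + dy ∧ y + dy < (sol.length : Int) then
          ∑ dx ∈ Finset.Ico (-(D - |dy|)) ((D - |dy|) + 1),
            (if 0 ≤ x + dx ∧ x + dx < (((PySem.List.pyGetD sol (y+dy) "").toList.length) : Int)
                ∧ PySem.List.pyGetD (PySem.List.pyGetD sol (y+dy) "").toList (x + dx) ' ' = t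
             then (1:Int) else 0)
         else 0) := by
    funext n dy
    dsimp only
    by_cases h : 0 ≤ y + dy ∧ y + dy < (sol.length : Int)
    · rw [if_pos h, if_pos h,
        foldl_if_add_k (fun dx => 0 ≤ x + dx ∧ x + dx < (((PySem.List.pyGetD sol (y+dy) "").toList.length) : Int)
            ∧ PySem.List.pyGetD (PySem.List.pyGetD sol (y+dy) "").toList (x + dx) ' ' = t) 1,
        countP_eq_sum_map, sum_pyRange]
      ring
    · rw [if_neg h, if_neg h]; ring
  rw [hstep, PySem.List.foldl_add, sum_pyRange, zero_add]
  unfold pvT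
  rw [sum_shift_window (fun yy => ∑ k ∈ Finset.Ico (0 : Int) ((rowAt sol yy).length : Int),
        if chAt (rowAt sol yy) k = t ∧ pvDistA (yy, k) y x ≤ D then (1:Int) else 0) y D (sol.length : Int)
      (by
        intro yy hyy
        apply Finset.sum_eq_zero
        intro k _
        rw [if_neg]
        rintro ⟨-, hle⟩
        rw [pvDistA_eq] at hle
        have := abs_nonneg (k - x)
        linarith)]
  apply Finset.sum_congr rfl
  intro dy hdy
  rw [Finset.mem_Ico] at hdy
  have hady : |dy| ≤ D := abs_le.mpr ⟨by omega, by omega⟩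
  by_cases h : 0 ≤ y + dy ∧ y + dy < (sol.length : Int)
  · rw [if_pos h, if_pos h]
    -- identify the row
    have hrow : (PySem.List.pyGetD sol (y + dy) "").toList = rowAt sol (y + dy) := by
      rw [PySem.List.pyGetD_eq_getElem sol "" h.1 h.2, rowAt,
        List.getD_eq_getElem?_getD, List.getElem?_eq_getElem (by omega : (y+dy).toNat < sol.length)]
      simp
    rw [hrow]
    rw [sum_shift_window (fun k =>
        if chAt (rowAt sol (y + dy)) k = t ∧ pvDistA (y + dy, k) y x ≤ D then (1:Int) else 0)
        x (D - |dy|) ((rowAt sol (y + dy)).length : Int)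
      (by
        intro k hk
        dsimp only
        rw [if_neg]
        rintro ⟨-, hle⟩
        rw [pvDistA_eq, show y + dy - y = dy by ring] at hle
        linarith)]
    apply Finset.sum_congr rfl
    intro k hk
    rw [Finset.mem_Ico] at hk
    have hak : |k| ≤ D - |dy| := abs_le.mpr ⟨by omega, by omega⟩
    by_cases hb : 0 ≤ x + k ∧ x + k < ((rowAt sol (y + dy)).length : Int)
    · have hch : PySem.List.pyGetD (rowAt sol (y + dy)) (x + k) ' ' = chAt (rowAt sol (y + dy)) (x + k) := by
        rw [PySem.List.pyGetD_eq_getElem _ ' ' hb.1 hb.2, chAt]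
        rw [List.getD_eq_getElem?_getD, List.getElem?_eq_getElem (by omega : (x+k).toNat < (rowAt sol (y+dy)).length)]
        simp
      have hdist : pvDistA (y + dy, x + k) y x ≤ D := by
        rw [pvDistA_eq, show y + dy - y = dy by ring, show x + k - x = k by ring]; linarith
      rw [if_pos hb]
      by_cases hc : chAt (rowAt sol (y + dy)) (x + k) = t
      · rw [if_pos ⟨hb.1, hb.2, by rw [hch, hc]⟩, if_pos ⟨hc, hdist⟩]
      · rw [if_neg (by rintro ⟨-, -, hx⟩; exact hc (by rw [← hch, hx])),
          if_neg (by rintro ⟨hx, -⟩; exact hc hx)]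
    · rw [if_neg (by rintro ⟨a, b, -⟩; exact hb ⟨a, b⟩), if_neg hb]
  · rw [if_neg h, if_neg h]

theorem facs_row_aux (t : Char) : ∀ (cs : List Char) (acc : List (Int × Int)) (y x0 : Int),
    cs.foldl (fun (st : List (Int × Int) × Int × Int) plot =>
        ((if plot = t then st.1 ++ [(st.2.1, st.2.2)] else st.1), st.2.1, st.2.2 + 1)) (acc, y, x0)
      = (acc ++ facsRow t y cs x0, y, x0 + cs.length) := by
  intro cs
  induction cs with
  | nil => intro acc y x0; simp [facsRow]
  | cons c cs ih =>
      intro acc y x0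
      simp only [List.foldl_cons, facsRow, ih]
      by_cases h : c = t <;> simp [h] <;> ring

theorem facs_eq (t : Char) (board : List String) :
    find_all_coordinates t board = facsRows t board 0 := by
  suffices h : ∀ (rows : List String) (acc : List (Int × Int)) (y0 : Int),
      (rows.foldl (fun (st : List (Int × Int) × Int × Int) row =>
          let st2 := row.toList.foldl
            (fun (st : List (Int × Int) × Int × Int) plot =>
              ((if plot = t then st.1 ++ [(st.2.1, st.2.2)] else st.1), st.2.1, st.2.2 + 1)) st
          (st2.1, st2.2.1 + 1, 0)) (acc, y0, 0))
        = (acc ++ facsRows t rows y0, y0 + rows.length, 0) by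
    unfold find_all_coordinates
    rw [h board [] 0]
    simp
  intro rows
  induction rows with
  | nil => intro acc y0; simp [facsRows]
  | cons row rest ih =>
      intro acc y0
      simp only [List.foldl_cons, facs_row_aux, facsRows, ih]
      simp
      ring

theorem count_eq (sol : List String) (y x D : Int) (t : Char) :
    (((find_all_coordinates t sol).countP fun cd => decide (pvDistA cd y x ≤ D)) : Int)
      = count_near sol y x D t := by
  rw [facs_eq, A_total, ← count_near_eq]

theorem foldA (sol : List String) (y x D k : Int) (t : Char) (a : Int) :
    (find_all_coordinates t sol).foldl (fun s cd => if pvDistA cd y x ≤ D then s + k else s) a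
      = a + k * count_near sol y x D t := by
  rw [foldl_if_add_k (fun cd => pvDistA cd y x ≤ D) k, count_eq]

theorem nested_row_aux (f : Int → Int → Int → Char → Int) :
    ∀ (cs : List Char) (s y x0 : Int),
      cs.foldl (fun (st : Int × Int × Int) plot => (f st.1 st.2.1 st.2.2 plot, st.2.1, st.2.2 + 1)) (s, y, x0)
        = ((PySem.List.enumerate cs x0).foldl (fun sc xp => f sc y xp.1 xp.2) s, y, x0 + cs.length) := by
  intro cs
  induction cs with
  | nil => intro s y x0; simp [PySem.List.enumerate_nil]
  | cons c cs ih =>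
      intro s y x0
      simp only [List.foldl_cons, PySem.List.enumerate_cons, ih]
      simp
      ring

theorem nested_eq (f : Int → Int → Int → Char → Int) :
    ∀ (rows : List String) (s y0 : Int),
      (rows.foldl (fun (st : Int × Int × Int) row =>
          let st2 := row.toList.foldl
            (fun (st : Int × Int × Int) plot => (f st.1 st.2.1 st.2.2 plot, st.2.1, st.2.2 + 1)) st
          (st2.1, st2.2.1 + 1, 0)) (s, y0, 0)).1
        = (PySem.List.enumerate rows y0).foldl (fun sc yr =>
            (PySem.List.enumerate yr.2.toList 0).foldl (fun sc xp => f sc yr.1 xp.1 xp.2) sc) s := by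
  suffices h : ∀ (rows : List String) (s y0 : Int),
      (rows.foldl (fun (st : Int × Int × Int) row =>
          let st2 := row.toList.foldl
            (fun (st : Int × Int × Int) plot => (f st.1 st.2.1 st.2.2 plot, st.2.1, st.2.2 + 1)) st
          (st2.1, st2.2.1 + 1, 0)) (s, y0, 0))
        = ((PySem.List.enumerate rows y0).foldl (fun sc yr =>
            (PySem.List.enumerate yr.2.toList 0).foldl (fun sc xp => f sc yr.1 xp.1 xp.2) sc) s,
           y0 + rows.length, 0) by
    intro rows s y0; rw [h]
  intro rows
  induction rows with
  | nil => intro s y0; simp [PySem.List.enumerate_nil]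
  | cons row rest ih =>
      intro s y0
      simp only [List.foldl_cons, PySem.List.enumerate_cons, nested_row_aux, ih]
      simp
      ring

theorem mkneg (p : (Int × Int) → Prop) [DecidablePred p] (k : Int) :
    (fun (s : Int) (cd : Int × Int) => if p cd then s - k else s)
      = fun (s : Int) (cd : Int × Int) => if p cd then s + (-k) else s := by
  funext s cd; split_ifs <;> ring

theorem stepA_eq_stepB (orig : List (List Int)) (sol : List String) (s y x : Int) (p : Char) :
    scoreStepA orig (find_all_coordinates 'R' sol) (find_all_coordinates 'C' sol)
      (find_all_coordinates 'I' sol) s y x p = scoreStepB orig sol s y x p := by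
  unfold scoreStepA scoreStepB
  split_ifs with h1 h2 h3 h4 h5
  all_goals try dsimp only
  all_goals first
    | (rw [mkneg (fun cd => pvDistA cd y x ≤ 2) 10, mkneg (fun cd => pvDistA cd y x ≤ 2) 20,
        foldA, foldA, foldA]; try ring)
    | (rw [mkneg (fun cd => pvDistA cd y x ≤ 3) 5, foldA, foldA]; try ring)
    | (rw [mkneg (fun cd => pvDistA cd y x ≤ 2) 4, foldA, foldA]; try ring)
    | (rw [foldA]; try ring)

-- ===== VERDICT (by name: the statement is the Claim_ definition above) =====
theorem score_solution_spec : Claim_equal_score_solution := by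
  intro orig sol _ _
  unfold Spec_score_solution score_solution score_solution_alt
  rw [nested_eq]
  have h : (fun (sc : Int) (yr : Int × String) =>
      (PySem.List.enumerate yr.2.toList 0).foldl
        (fun sc xp => scoreStepA orig (find_all_coordinates 'R' sol) (find_all_coordinates 'C' sol)
            (find_all_coordinates 'I' sol) sc yr.1 xp.1 xp.2) sc)
      = (fun (sc : Int) (yr : Int × String) =>
      (PySem.List.enumerate yr.2.toList 0).foldl
        (fun sc xp => scoreStepB orig sol sc yr.1 xp.1 xp.2) sc) := by
    funext sc yr
    congr 1
    funext sc xp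
    exact stepA_eq_stepB orig sol sc yr.1 xp.1 xp.2
  rw [h]
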